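-- pv_equiv track=rewrite | github.com/Anrolosia/docker_lens | custom_components/docker_lens/api.py | _extract_all_local_repo_digests
-- ===== SOURCE A (Python) =====
-- from typing import Any
--
-- def _extract_all_local_repo_digests(
--     image_attrs: dict[str, Any], image_name: str
-- ) -> set[str]:
--     """Return ALL local manifest digests matching the image repository.
--
--     An image can be pulled multiple times as the manifest list evolves,
--     producing several RepoDigests entries for the same repo.  We keep every
--     one so that any matching remote digest counts as up-to-date.
--     """
--     repo_digests = image_attrs.get("RepoDigests") or []
--     if not repo_digests:
--         return set()
--
--     image_repo = _normalize_repo_name(image_name.split("@", 1)[0].rsplit(":", 1)[0])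
--
--     matched: set[str] = set()
--     for digest_ref in repo_digests:
--         if "@" not in digest_ref:
--             continue
--         ref_repo, ref_digest = digest_ref.split("@", 1)
--         if _normalize_repo_name(ref_repo) == image_repo:
--             matched.add(ref_digest)
--
--     if matched:
--         return matched
--
--     # Fallback: return all digests when repo name matching is inconclusive.
--     return {d.split("@", 1)[1] for d in repo_digests if "@" in d}
--
-- def _normalize_repo_name(repo: str) -> str:
--     """Normalize repository names for digest matching.
--
--     Examples:
--     - alpine -> library/alpine
--     - docker.io/library/alpine -> library/alpine
--     - registry-1.docker.io/library/alpine -> library/alpine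
--     """
--     normalized = repo.strip().lower()
--     for prefix in (
--         "docker.io/",
--         "index.docker.io/",
--         "registry-1.docker.io/",
--     ):
--         if normalized.startswith(prefix):
--             normalized = normalized[len(prefix) :]
--             break
--     if "/" not in normalized:
--         normalized = f"library/{normalized}"
--     return normalized
-- ===== SOURCE B (Python) =====
-- def _extract_all_local_repo_digests(image_attrs, image_name):
--     """Inverted index: one grouping pass maps each digest to the set of
--     normalized repos it was seen under; the match test and the fallback
--     then read the prebuilt index instead of rescanning RepoDigests."""
--     repo_digests = image_attrs.get("RepoDigests") or []
--     image_repo = _normalize_repo_name(image_name.split("@", 1)[0].rsplit(":", 1)[0])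
--     index = {}
--     for ref in repo_digests:
--         if "@" not in ref:
--             continue
--         ref_repo, ref_digest = ref.split("@", 1)
--         index.setdefault(ref_digest, set()).add(_normalize_repo_name(ref_repo))
--     matched = {d for d, repos in index.items() if image_repo in repos}
--     return matched if matched else set(index)
--
--
-- def _normalize_repo_name(repo):
--     normalized = repo.strip().lower()
--     for prefix in (
--         "docker.io/",
--         "index.docker.io/",
--         "registry-1.docker.io/",
--     ):
--         if normalized.startswith(prefix):
--             normalized = normalized[len(prefix):]
--             break
--     if "/" not in normalized:
--         normalized = f"library/{normalized}"
--     return normalized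
-- ===== Notes on version B (the rewrite author's own statement) =====
-- stated objective: alternative
-- what changed: B builds an inverted index dict mapping each digest to the set of normalized repos it was seen under, then derives the matched set by filtering the index items and the inconclusive-match fallback as the index's key set, replacing A's matched-accumulating loop, early returns and separate fallback set-comprehension rescan of RepoDigests.
-- outside the precondition, e.g. on _extract_all_local_repo_digests({'RepoDigests': ['r@x', 's@x']}, 'zzz'): A returns {'x'}, B returns {'x'}
import Mathlib
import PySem

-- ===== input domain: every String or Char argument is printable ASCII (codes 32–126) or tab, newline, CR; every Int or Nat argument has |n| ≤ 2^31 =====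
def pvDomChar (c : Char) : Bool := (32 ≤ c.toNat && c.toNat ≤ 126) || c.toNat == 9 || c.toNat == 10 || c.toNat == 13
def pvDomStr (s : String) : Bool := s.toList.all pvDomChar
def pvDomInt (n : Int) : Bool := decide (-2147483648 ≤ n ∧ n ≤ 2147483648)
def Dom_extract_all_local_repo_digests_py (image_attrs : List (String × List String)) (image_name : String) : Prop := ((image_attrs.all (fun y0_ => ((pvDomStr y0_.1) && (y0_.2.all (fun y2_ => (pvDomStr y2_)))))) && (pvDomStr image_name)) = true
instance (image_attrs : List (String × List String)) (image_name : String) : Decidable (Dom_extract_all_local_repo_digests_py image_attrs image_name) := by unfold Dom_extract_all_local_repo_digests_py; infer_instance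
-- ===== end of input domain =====

-- B replaces A's matched-accumulating loop + separate fallback rescan by one grouping
-- pass building an inverted index digest → set of normalized repos; matched and the
-- fallback are then read off the index (objective: alternative). Both Pythons return
-- an unordered set; Pre_ keeps the inputs where its list representation is unambiguous.

-- ===== PORT A =====
-- shared module helper _normalize_repo_name (identical in Source A and Source B)
def pyNormalizeRepoName (repo : String) : String :=
  let n0 := PySem.Str.lower (PySem.Str.strip repo)
  -- for prefix in (...): if startswith: strip it and break  (literal tuple, unrolled in order)
  let n1 :=
    if PySem.Str.startswith n0 "docker.io/" then PySem.Str.slice n0 (some 10) none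
    else if PySem.Str.startswith n0 "index.docker.io/" then PySem.Str.slice n0 (some 16) none
    else if PySem.Str.startswith n0 "registry-1.docker.io/" then PySem.Str.slice n0 (some 21) none
    else n0
  if PySem.Str.isIn "/" n1 then n1 else "library/" ++ n1

-- s.split("@", 1)[0] (split with a non-empty sep always yields ≥ 1 piece; wildcard unreachable)
def pySplitAtHead (s : String) : String :=
  match PySem.Str.splitMax? s "@" 1 with
  | some (h :: _) => h
  | _ => s

-- s.rsplit(":", 1)[0]; exact: it is s[:s.rfind(":")] when ":" occurs in s, else s
def pyRsplitColonHead (s : String) : String :=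
  let r := PySem.Str.rfind s ":"
  if r = -1 then s else PySem.Str.slice s none (some r)

def extract_all_local_repo_digests_py (image_attrs : List (String × List String)) (image_name : String) : List String :=
  let g := (PySem.Dict.mk image_attrs).getD "RepoDigests" []
  let repo_digests := if g = [] then [] else g          -- image_attrs.get("RepoDigests") or []
  if repo_digests = [] then []                          -- if not repo_digests: return set()
  else
    let image_repo := pyNormalizeRepoName (pyRsplitColonHead (pySplitAtHead image_name))
    let matched := repo_digests.foldl (fun m digest_ref =>
      if PySem.Str.isIn "@" digest_ref = false then m   -- if "@" not in digest_ref: continue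
      else match PySem.Str.splitMax? digest_ref "@" 1 with
        | some (ref_repo :: ref_digest :: _) =>
            if pyNormalizeRepoName ref_repo = image_repo then PySem.Set.add m ref_digest else m
        | _ => m) PySem.Set.empty
    if matched ≠ [] then matched                        -- if matched: return matched
    else                                                -- {d.split("@", 1)[1] for d in repo_digests if "@" in d}
      repo_digests.foldl (fun s d =>
        if PySem.Str.isIn "@" d = false then s
        else match PySem.Str.splitMax? d "@" 1 with
          | some (_ :: dg :: _) => PySem.Set.add s dg
          | _ => s) PySem.Set.empty

-- ===== PORT B =====
def extract_all_local_repo_digests_py_alt (image_attrs : List (String × List String)) (image_name : String) : List String :=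
  let g := (PySem.Dict.mk image_attrs).getD "RepoDigests" []
  let repo_digests := if g = [] then [] else g          -- image_attrs.get("RepoDigests") or []
  let image_repo := pyNormalizeRepoName (pyRsplitColonHead (pySplitAtHead image_name))
  -- index.setdefault(ref_digest, set()).add(_normalize_repo_name(ref_repo)) mutates the
  -- stored set in place; Dict.insert overwrites keeping the key's position — exact
  let index := repo_digests.foldl (fun (idx : PySem.Dict String (List String)) ref =>
      if PySem.Str.isIn "@" ref = false then idx        -- if "@" not in ref: continue
      else match PySem.Str.splitMax? ref "@" 1 with
        | some (ref_repo :: ref_digest :: _) =>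
            idx.insert ref_digest
              (PySem.Set.add (idx.getD ref_digest PySem.Set.empty) (pyNormalizeRepoName ref_repo))
        | _ => idx) PySem.Dict.empty
  -- matched = {d for d, repos in index.items() if image_repo in repos}
  let matched := index.items.foldl (fun (m : List String) kv =>
      if PySem.Set.contains kv.2 image_repo then PySem.Set.add m kv.1 else m) PySem.Set.empty
  if matched ≠ [] then matched else PySem.Set.ofList index.keys   -- matched if matched else set(index)

-- ===== PRECONDITION & SPEC =====
-- the digest part (after the first '@') of each '@'-containing RepoDigests entry
def pvDigestsOf (l : List String) : List String :=
  l.filterMap (fun ref =>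
    if PySem.Str.isIn "@" ref = false then none
    else match PySem.Str.splitMax? ref "@" 1 with
      | some (_ :: d :: _) => some d
      | _ => none)

-- Pre_ excludes inputs where the same digest string appears in several '@'-entries of
-- RepoDigests: there A and B return the SAME Python set, but the two algorithms build that
-- unordered set in different insertion orders, a set-iteration-order corner the
-- order-sensitive list representation cannot equate.
def Pre_extract_all_local_repo_digests_py (image_attrs : List (String × List String)) (image_name : String) : Prop :=
  (pvDigestsOf ((PySem.Dict.mk image_attrs).getD "RepoDigests" [])).Nodup

instance (image_attrs : List (String × List String)) (image_name : String) : Decidable (Pre_extract_all_local_repo_digests_py image_attrs image_name) := by unfold Pre_extract_all_local_repo_digests_py; infer_instance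

def pvWitness_extract_all_local_repo_digests_py : (List (String × List String)) × String :=
  ([("RepoDigests", ["alpine@sha256:aa", "busybox@sha256:bb"])], "alpine")

def Spec_extract_all_local_repo_digests_py (image_attrs : List (String × List String)) (image_name : String) (out : List String) : Prop := out = extract_all_local_repo_digests_py_alt image_attrs image_name
instance (image_attrs : List (String × List String)) (image_name : String) (out : List String) : Decidable (Spec_extract_all_local_repo_digests_py image_attrs image_name out) := by unfold Spec_extract_all_local_repo_digests_py; infer_instance

-- ===== CLAIM =====
def Claim_equal_extract_all_local_repo_digests_py : Prop := ∀ (image_attrs : List (String × List String)) (image_name : String), Dom_extract_all_local_repo_digests_py image_attrs image_name → Pre_extract_all_local_repo_digests_py image_attrs image_name → Spec_extract_all_local_repo_digests_py image_attrs image_name (extract_all_local_repo_digests_py image_attrs image_name)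

-- ===== LEMMAS AND PROOFS =====

-- the parse both loops perform on an entry: (normalized repo, digest), none = skipped
def pvParse (ref : String) : Option (String × String) :=
  if PySem.Str.isIn "@" ref = false then none
  else match PySem.Str.splitMax? ref "@" 1 with
    | some (r :: d :: _) => some (pyNormalizeRepoName r, d)
    | _ => none

theorem digestsOf_eq (l : List String) :
    pvDigestsOf l = (l.filterMap pvParse).map Prod.snd := by
  rw [List.map_filterMap]
  unfold pvDigestsOf
  congr 1
  funext x
  unfold pvParse
  by_cases h : PySem.Str.isIn "@" x = false
  · rw [if_pos h, if_pos h]; rfl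
  · rw [if_neg h, if_neg h]
    rcases hs : PySem.Str.splitMax? x "@" 1 with _ | ⟨_ | ⟨r, _ | ⟨d, t⟩⟩⟩ <;> rfl

-- A's matching loop, as a fold over the parsed entries
set_option maxHeartbeats 1000000 in
theorem a_matched_eq (ir : String) (l : List String) (m : List String) :
    l.foldl (fun m digest_ref =>
      if PySem.Str.isIn "@" digest_ref = false then m
      else match PySem.Str.splitMax? digest_ref "@" 1 with
        | some (ref_repo :: ref_digest :: _) =>
            if pyNormalizeRepoName ref_repo = ir then PySem.Set.add m ref_digest else m
        | _ => m) m
    = (l.filterMap pvParse).foldl (fun m p =>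
        if p.1 = ir then PySem.Set.add m p.2 else m) m := by
  rw [List.foldl_filterMap]
  congr 1
  funext m x
  unfold pvParse
  by_cases h : PySem.Str.isIn "@" x = false
  · rw [if_pos h, if_pos h]
  · rw [if_neg h, if_neg h]
    rcases hs : PySem.Str.splitMax? x "@" 1 with _ | ⟨_ | ⟨r, _ | ⟨d, t⟩⟩⟩ <;> dsimp only

-- A's fallback loop, as a fold over the parsed entries
set_option maxHeartbeats 1000000 in
theorem a_fallback_eq (l : List String) (s : List String) :
    l.foldl (fun s d =>
      if PySem.Str.isIn "@" d = false then s
      else match PySem.Str.splitMax? d "@" 1 with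
        | some (_ :: dg :: _) => PySem.Set.add s dg
        | _ => s) s
    = (l.filterMap pvParse).foldl (fun s p => PySem.Set.add s p.2) s := by
  rw [List.foldl_filterMap]
  congr 1
  funext s x
  unfold pvParse
  by_cases h : PySem.Str.isIn "@" x = false
  · rw [if_pos h, if_pos h]
  · rw [if_neg h, if_neg h]
    rcases hs : PySem.Str.splitMax? x "@" 1 with _ | ⟨_ | ⟨r, _ | ⟨d, t⟩⟩⟩ <;> rfl

-- B's index-building loop, as a fold over the parsed entries
set_option maxHeartbeats 1000000 in
theorem b_index_eq (l : List String) (idx : PySem.Dict String (List String)) :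
    l.foldl (fun (idx : PySem.Dict String (List String)) ref =>
      if PySem.Str.isIn "@" ref = false then idx
      else match PySem.Str.splitMax? ref "@" 1 with
        | some (ref_repo :: ref_digest :: _) =>
            idx.insert ref_digest
              (PySem.Set.add (idx.getD ref_digest PySem.Set.empty) (pyNormalizeRepoName ref_repo))
        | _ => idx) idx
    = (l.filterMap pvParse).foldl (fun idx p =>
        idx.insert p.2 (PySem.Set.add (idx.getD p.2 PySem.Set.empty) p.1)) idx := by
  rw [List.foldl_filterMap]
  congr 1
  funext idx x
  unfold pvParse
  by_cases h : PySem.Str.isIn "@" x = false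
  · rw [if_pos h, if_pos h]
  · rw [if_neg h, if_neg h]
    rcases hs : PySem.Str.splitMax? x "@" 1 with _ | ⟨_ | ⟨r, _ | ⟨d, t⟩⟩⟩ <;> dsimp only

-- with pairwise-distinct fresh digests, the index fold appends one singleton entry per pair
theorem index_items (P : List (String × String)) (idx : PySem.Dict String (List String))
    (hnd : (P.map Prod.snd).Nodup) (hfresh : ∀ p ∈ P, idx.contains p.2 = false) :
    (P.foldl (fun idx p =>
        idx.insert p.2 (PySem.Set.add (idx.getD p.2 PySem.Set.empty) p.1)) idx).items
    = idx.items ++ P.map (fun p => (p.2, [p.1])) := by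
  induction P generalizing idx with
  | nil => simp
  | cons p P ih =>
    have hc : idx.contains p.2 = false := hfresh p (List.mem_cons_self ..)
    have hgd : idx.getD p.2 PySem.Set.empty = PySem.Set.empty := by
      simp [PySem.Dict.getD_of_not_contains, hc]
    simp only [List.map_cons, List.nodup_cons] at hnd
    have ih' := ih (idx.insert p.2 (PySem.Set.add PySem.Set.empty p.1)) hnd.2 (by
      intro q hq
      have hne : q.2 ≠ p.2 := by
        intro he; exact hnd.1 (he ▸ List.mem_map_of_mem hq)
      rw [PySem.Dict.contains_insert]
      simp [hne, hfresh q (List.mem_cons_of_mem _ hq)])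
    simp only [List.foldl_cons, hgd, ih', PySem.Dict.items_insert, hc]
    simp [PySem.Set.add, PySem.Set.empty]

-- ===== VERDICT (by name: the statement is the Claim_ definition above) =====
theorem extract_all_local_repo_digests_py_spec : Claim_equal_extract_all_local_repo_digests_py := by
  intro image_attrs image_name _ hpre
  unfold Spec_extract_all_local_repo_digests_py
  unfold Pre_extract_all_local_repo_digests_py at hpre
  simp only [extract_all_local_repo_digests_py, extract_all_local_repo_digests_py_alt]
  set g := (PySem.Dict.mk image_attrs).getD "RepoDigests" [] with hg
  have hrd : (if g = [] then [] else g) = g := by split_ifs with h <;> simp [h]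
  rw [hrd]
  set ir := pyNormalizeRepoName (pyRsplitColonHead (pySplitAtHead image_name)) with hir
  set P := g.filterMap pvParse with hP
  have hnd : (P.map Prod.snd).Nodup := by rw [← digestsOf_eq]; exact hpre
  -- B's index has exactly one singleton entry per parsed pair
  have hitems : (g.foldl (fun (idx : PySem.Dict String (List String)) ref =>
      if PySem.Str.isIn "@" ref = false then idx
      else match PySem.Str.splitMax? ref "@" 1 with
        | some (ref_repo :: ref_digest :: _) =>
            idx.insert ref_digest
              (PySem.Set.add (idx.getD ref_digest PySem.Set.empty) (pyNormalizeRepoName ref_repo))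
        | _ => idx) PySem.Dict.empty).items
      = P.map (fun p => (p.2, [p.1])) := by
    rw [b_index_eq, ← hP, index_items P PySem.Dict.empty hnd (by intro p _; simp)]
    simp [PySem.Dict.empty]
  -- B's matched set equals A's matched set
  have hmatch : ∀ (Q : List (String × String)) (m : List String),
      (Q.map (fun p => (p.2, [p.1]))).foldl
        (fun (m : List String) kv =>
          if PySem.Set.contains kv.2 ir then PySem.Set.add m kv.1 else m) m
      = Q.foldl (fun m p => if p.1 = ir then PySem.Set.add m p.2 else m) m := by
    intro Q
    induction Q with
    | nil => intro m; rfl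
    | cons p Q ih =>
      intro m
      simp only [List.map_cons, List.foldl_cons]
      have hcon : (PySem.Set.contains [p.1] ir = true) ↔ (p.1 = ir) := by
        simp [PySem.Set.contains_eq_listContains, eq_comm]
      by_cases hp : p.1 = ir
      · rw [if_pos (hcon.mpr hp), if_pos hp]; exact ih _
      · rw [if_neg (fun hb => hp (hcon.mp hb)), if_neg hp]; exact ih _
  -- B's fallback (the index's key set) equals A's fallback scan
  have hkeys : (g.foldl (fun (idx : PySem.Dict String (List String)) ref =>
      if PySem.Str.isIn "@" ref = false then idx
      else match PySem.Str.splitMax? ref "@" 1 with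
        | some (ref_repo :: ref_digest :: _) =>
            idx.insert ref_digest
              (PySem.Set.add (idx.getD ref_digest PySem.Set.empty) (pyNormalizeRepoName ref_repo))
        | _ => idx) PySem.Dict.empty).keys = P.map Prod.snd := by
    simp only [PySem.Dict.keys, hitems, List.map_map]
    simp [Function.comp]
  rw [hitems, hmatch, hkeys]
  by_cases hge : g = []
  · rw [if_pos hge]
    have hPnil : P = [] := by rw [hP, hge]; rfl
    rw [hPnil]
    simp
  · rw [if_neg hge]
    rw [a_matched_eq ir g PySem.Set.empty, ← hP]
    by_cases hm : P.foldl (fun m p => if p.1 = ir then PySem.Set.add m p.2 else m) PySem.Set.empty ≠ []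
    · rw [if_pos hm, if_pos hm]
    · rw [if_neg hm, if_neg hm]
      rw [a_fallback_eq g PySem.Set.empty, ← hP]
      rw [PySem.Set.ofList_eq_foldl, List.foldl_map]
      rfl
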